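-- pv_equiv track=rewrite | github.com/HoangNguyen161201/trade-yt | runs/price-action/util.py | trim_keywords_to_limit
-- ===== SOURCE A (Python) =====
-- def trim_keywords_to_limit(keywords_str, limit=400):
--     keywords = [kw.strip() for kw in keywords_str.split(',')]
--     result = []
--     total_length = 0
--
--     for kw in keywords:
--         kw_len = len(kw)
--         # Cộng thêm 1 cho dấu phẩy nếu đã có từ trước
--         if result:
--             kw_len += 1
--         if total_length + kw_len <= limit:
--             result.append(kw)
--             total_length += kw_len
--         else:
--             break
--
--     return ",".join(result)
-- ===== SOURCE B (Python) =====
-- from itertools import accumulate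
--
-- def trim_keywords_to_limit(keywords_str, limit=400):
--     keywords = [kw.strip() for kw in keywords_str.split(',')]
--     # join-length of the first k keywords is cums[k-1] - 1
--     cums = list(accumulate(len(kw) + 1 for kw in keywords))
--     k = sum(1 for c in cums if c <= limit + 1)
--     return ",".join(keywords[:k])
-- ===== Notes on version B (the rewrite author's own statement) =====
-- stated objective: alternative
-- what changed: Replaces the greedy loop carrying a result list, a running total and a conditional comma increment with a prefix-sum table of join-lengths (itertools.accumulate) from which the cutoff count is read off as the number of prefix sums <= limit+1, then joins a single slice.
import Mathlib
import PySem

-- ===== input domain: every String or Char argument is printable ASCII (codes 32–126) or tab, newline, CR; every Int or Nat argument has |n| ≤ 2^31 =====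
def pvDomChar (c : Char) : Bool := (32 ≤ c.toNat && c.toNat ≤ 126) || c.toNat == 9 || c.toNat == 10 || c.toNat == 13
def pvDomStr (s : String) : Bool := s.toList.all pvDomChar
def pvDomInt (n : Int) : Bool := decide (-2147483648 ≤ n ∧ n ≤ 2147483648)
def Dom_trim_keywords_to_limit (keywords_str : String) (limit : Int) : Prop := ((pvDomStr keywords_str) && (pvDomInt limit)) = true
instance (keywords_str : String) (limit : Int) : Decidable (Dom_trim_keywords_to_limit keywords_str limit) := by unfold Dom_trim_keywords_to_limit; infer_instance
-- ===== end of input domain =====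

-- B replaces A's greedy loop (result list + running total + conditional comma increment +
-- break) with a prefix-sum table of join-lengths and a count of the sums ≤ limit+1; same
-- cost, different decomposition ("alternative").

-- ===== PORT A =====
-- the for-loop of A: state = (result, total_length), break = stop recursing
def pvLoopA (limit : Int) : List String → List String → Int → List String
  | [], res, _ => res
  | kw :: rest, res, tot =>
    let kw_len := PySem.Str.len kw + (if res.isEmpty then 0 else 1)
    if tot + kw_len ≤ limit then pvLoopA limit rest (res ++ [kw]) (tot + kw_len)
    else res

def trim_keywords_to_limit (keywords_str : String) (limit : Int) : String :=
  let keywords := ((PySem.Str.split? keywords_str ",").getD []).map PySem.Str.strip  -- sep "," ≠ "": split? is some here, getD exact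
  PySem.Str.join "," (pvLoopA limit keywords [] 0)

-- ===== PORT B =====
-- itertools.accumulate over (len(kw)+1) starting from 0
def pvAccum (c : Int) : List Int → List Int
  | [] => []
  | x :: xs => (c + x) :: pvAccum (c + x) xs

def trim_keywords_to_limit_alt (keywords_str : String) (limit : Int) : String :=
  let keywords := ((PySem.Str.split? keywords_str ",").getD []).map PySem.Str.strip  -- sep "," ≠ "": split? is some here, getD exact
  let cums := pvAccum 0 (keywords.map (fun kw => PySem.Str.len kw + 1))
  let k := (cums.filter (fun c => c ≤ limit + 1)).length
  PySem.Str.join "," (keywords.take k)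

-- ===== PRECONDITION & SPEC =====
def Spec_trim_keywords_to_limit (keywords_str : String) (limit : Int) (out : String) : Prop := out = trim_keywords_to_limit_alt keywords_str limit
instance (keywords_str : String) (limit : Int) (out : String) : Decidable (Spec_trim_keywords_to_limit keywords_str limit out) := by unfold Spec_trim_keywords_to_limit; infer_instance

-- ===== CLAIM (what is proved, stated in full; the proofs are below) =====
def Claim_equal_trim_keywords_to_limit : Prop := ∀ (keywords_str : String) (limit : Int), Dom_trim_keywords_to_limit keywords_str limit → Spec_trim_keywords_to_limit keywords_str limit (trim_keywords_to_limit keywords_str limit)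

-- ===== LEMMAS AND PROOFS =====

-- number of keywords A still appends when the join-length so far is c - 1
def pvCnt (limit c : Int) : List String → Nat
  | [] => 0
  | kw :: rest =>
    if c + (PySem.Str.len kw + 1) ≤ limit + 1 then
      pvCnt limit (c + (PySem.Str.len kw + 1)) rest + 1
    else 0

lemma pvStrLen_nonneg (s : String) : 0 ≤ PySem.Str.len s := by
  simp [PySem.Str.len_eq]

lemma pvAccum_filter_nil (limit : Int) (lens : List Int) : ∀ c, (∀ x ∈ lens, 1 ≤ x) →
    limit + 1 < c → (pvAccum c lens).filter (fun x => x ≤ limit + 1) = [] := by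
  induction lens with
  | nil => intro c _ _; simp [pvAccum]
  | cons x xs ih =>
    intro c h hc
    have hx : 1 ≤ x := h x (by simp)
    simp only [pvAccum, List.filter_cons]
    rw [if_neg (by simp; omega)]
    exact ih (c + x) (fun y hy => h y (by simp [hy])) (by omega)

lemma pvCnt_eq (limit : Int) (kws : List String) : ∀ c,
    pvCnt limit c kws =
      ((pvAccum c (kws.map (fun kw => PySem.Str.len kw + 1))).filter
        (fun x => x ≤ limit + 1)).length := by
  induction kws with
  | nil => intro c; simp [pvCnt, pvAccum]
  | cons kw rest ih =>
    intro c
    simp only [pvCnt, List.map_cons, pvAccum, List.filter_cons]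
    by_cases h : c + (PySem.Str.len kw + 1) ≤ limit + 1
    · rw [if_pos h, if_pos (by simpa using h), ih]
      simp
    · rw [if_neg h, if_neg (by simpa using h)]
      rw [pvAccum_filter_nil limit _ (c + (PySem.Str.len kw + 1))
        (by intro x hx; simp at hx; obtain ⟨s, _, rfl⟩ := hx; have := pvStrLen_nonneg s; omega)
        (by omega)]
      simp

lemma pvLoopA_eq (limit : Int) (kws : List String) : ∀ (res : List String) (tot : Int),
    res ≠ [] → pvLoopA limit kws res tot = res ++ kws.take (pvCnt limit (tot + 1) kws) := by
  induction kws with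
  | nil => intro res tot _; simp [pvLoopA, pvCnt]
  | cons kw rest ih =>
    intro res tot hres
    simp only [pvLoopA, pvCnt, List.isEmpty_iff, if_neg hres]
    by_cases h : tot + (PySem.Str.len kw + 1) ≤ limit
    · rw [if_pos h, if_pos (by omega), ih (res ++ [kw]) _ (by simp)]
      have : tot + (PySem.Str.len kw + 1) + 1 = tot + 1 + (PySem.Str.len kw + 1) := by ring
      rw [this]
      simp [List.take_succ_cons]
    · rw [if_neg h, if_neg (by omega)]
      simp

lemma pvMain (kws : List String) (limit : Int) :
    pvLoopA limit kws [] 0 =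
      kws.take ((pvAccum 0 (kws.map (fun kw => PySem.Str.len kw + 1))).filter
        (fun x => x ≤ limit + 1)).length := by
  cases kws with
  | nil => simp [pvLoopA, pvAccum]
  | cons kw rest =>
    simp only [pvLoopA, List.isEmpty_nil, if_true, List.map_cons, pvAccum, List.filter_cons,
      add_zero, zero_add, List.nil_append]
    by_cases h : PySem.Str.len kw ≤ limit
    · rw [if_pos h, if_pos (by simp only [decide_eq_true_eq]; omega),
        pvLoopA_eq limit rest [kw] _ (by simp),
        pvCnt_eq limit rest (PySem.Str.len kw + 1)]
      simp [List.take_succ_cons]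
    · rw [if_neg h, if_neg (by simp only [decide_eq_true_eq]; omega),
        pvAccum_filter_nil limit _ (PySem.Str.len kw + 1)
          (by intro x hx; simp at hx; obtain ⟨s, _, rfl⟩ := hx; have := pvStrLen_nonneg s; omega)
          (by omega)]
      simp

-- ===== VERDICT (by name: the statement is the Claim_ definition above) =====
theorem trim_keywords_to_limit_spec : Claim_equal_trim_keywords_to_limit := by
  intro keywords_str limit _
  exact congrArg (PySem.Str.join ",")
    (pvMain (((PySem.Str.split? keywords_str ",").getD []).map PySem.Str.strip) limit)
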